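-- pv_equiv track=rewrite | github.com/wopozka/ump_map_monter | mont_demont.py | stworz_ulice_nr_tel_url
-- ===== SOURCE A (Python) =====
-- def stworz_ulice_nr_tel_url(daneDoZapisu):
--     for klucz in ('StreetDesc', 'HouseNumber', 'Phone', 'MiscInfo'):
--         if klucz in daneDoZapisu:
--             daneDoZapisu[klucz] = daneDoZapisu[klucz].replace(',', '°')
--     if 'MiscInfo' in daneDoZapisu:
--         if 'StreetDesc' not in daneDoZapisu:
--             daneDoZapisu['StreetDesc'] = ''
--         if 'HouseNumber' not in daneDoZapisu:
--             daneDoZapisu['HouseNumber'] = ''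
--         if 'Phone' not in daneDoZapisu:
--             daneDoZapisu['Phone'] = ''
--         return daneDoZapisu['StreetDesc'] + ';' + daneDoZapisu['HouseNumber'] + ';' + daneDoZapisu['Phone'] + ';' \
--                + daneDoZapisu['MiscInfo']
--     elif 'Phone' in daneDoZapisu:
--         if 'StreetDesc' not in daneDoZapisu:
--             daneDoZapisu['StreetDesc'] = ''
--         if 'HouseNumber' not in daneDoZapisu:
--             daneDoZapisu['HouseNumber'] = ''
--         return daneDoZapisu['StreetDesc'] + ';' + daneDoZapisu['HouseNumber'] + ';' + daneDoZapisu['Phone']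
--     elif 'HouseNumber' in daneDoZapisu:
--         if 'StreetDesc' not in daneDoZapisu:
--             daneDoZapisu['StreetDesc'] = ''
--         return daneDoZapisu['StreetDesc'] + ';' + daneDoZapisu['HouseNumber']
--     elif 'StreetDesc' in daneDoZapisu:
--         return daneDoZapisu['StreetDesc']
--     else:
--         return ''
-- ===== SOURCE B (Python) =====
-- def stworz_ulice_nr_tel_url(daneDoZapisu):
--     parts = None
--     for klucz in ('MiscInfo', 'Phone', 'HouseNumber', 'StreetDesc'):
--         if klucz in daneDoZapisu:
--             daneDoZapisu[klucz] = daneDoZapisu[klucz].replace(',', '°')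
--             parts = [daneDoZapisu[klucz]] if parts is None else [daneDoZapisu[klucz]] + parts
--         elif parts is not None:
--             daneDoZapisu[klucz] = ''
--             parts = [''] + parts
--     return ';'.join(parts) if parts is not None else ''
-- ===== Notes on version B (the rewrite author's own statement) =====
-- stated objective: alternative
-- what changed: Replaces A's staged design (a separate comma-replacement loop, then a four-way if/elif cascade each with its own fill-ins and hand-built concatenation) by one single reverse pass over the keys that builds the output list back-to-front with a None-sentinel accumulator, doing the comma replacement and the gap filling inside the same loop, finished by one join.
import Mathlib
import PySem

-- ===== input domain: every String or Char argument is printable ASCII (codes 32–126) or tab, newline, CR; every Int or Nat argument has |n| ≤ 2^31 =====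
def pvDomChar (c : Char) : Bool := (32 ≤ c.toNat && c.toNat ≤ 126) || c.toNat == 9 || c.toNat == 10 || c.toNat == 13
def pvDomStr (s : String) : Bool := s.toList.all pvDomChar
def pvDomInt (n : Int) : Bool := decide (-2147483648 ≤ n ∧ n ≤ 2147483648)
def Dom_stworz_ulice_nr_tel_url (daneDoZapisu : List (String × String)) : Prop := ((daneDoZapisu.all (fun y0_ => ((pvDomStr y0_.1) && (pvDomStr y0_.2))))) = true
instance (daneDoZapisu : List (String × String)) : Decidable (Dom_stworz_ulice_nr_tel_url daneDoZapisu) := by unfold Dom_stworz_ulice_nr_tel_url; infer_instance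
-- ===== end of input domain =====

-- B replaces A's staged cascade (comma loop, then four-way if/elif with per-branch fill-ins and
-- concatenations) by ONE reverse pass building the output list back-to-front with a None-sentinel
-- accumulator (objective: alternative). Both Pythons mutate the dict argument with the same
-- key/value updates, though in a different insertion order for the filled-in '' keys; the
-- equivalence proved here is about the RETURN value only.

-- ===== PORT A =====
def stworz_ulice_nr_tel_url (daneDoZapisu : List (String × String)) : String :=
  let d0 : PySem.Dict String String := PySem.Dict.mk daneDoZapisu
  -- for klucz in (...): if klucz in d: d[klucz] = d[klucz].replace(',', '°')
  let d := (["StreetDesc", "HouseNumber", "Phone", "MiscInfo"]).foldl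
    (fun d klucz => if d.contains klucz then d.insert klucz (PySem.Str.replace (d.getD klucz "") "," "°") else d) d0
  if d.contains "MiscInfo" then
    let d := if !(d.contains "StreetDesc") then d.insert "StreetDesc" "" else d
    let d := if !(d.contains "HouseNumber") then d.insert "HouseNumber" "" else d
    let d := if !(d.contains "Phone") then d.insert "Phone" "" else d
    d.getD "StreetDesc" "" ++ ";" ++ d.getD "HouseNumber" "" ++ ";" ++ d.getD "Phone" "" ++ ";" ++ d.getD "MiscInfo" ""
  else if d.contains "Phone" then
    let d := if !(d.contains "StreetDesc") then d.insert "StreetDesc" "" else d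
    let d := if !(d.contains "HouseNumber") then d.insert "HouseNumber" "" else d
    d.getD "StreetDesc" "" ++ ";" ++ d.getD "HouseNumber" "" ++ ";" ++ d.getD "Phone" ""
  else if d.contains "HouseNumber" then
    let d := if !(d.contains "StreetDesc") then d.insert "StreetDesc" "" else d
    d.getD "StreetDesc" "" ++ ";" ++ d.getD "HouseNumber" ""
  else if d.contains "StreetDesc" then
    d.getD "StreetDesc" ""
  else
    ""

-- ===== PORT B =====
-- one reverse pass; state = (dict, Option parts); 'parts = [x] + parts' builds the list back-to-front
def stworz_ulice_nr_tel_url_alt (daneDoZapisu : List (String × String)) : String :=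
  let st := (["MiscInfo", "Phone", "HouseNumber", "StreetDesc"]).foldl
    (fun (st : PySem.Dict String String × Option (List String)) klucz =>
      let d := st.1
      if d.contains klucz then
        let d := d.insert klucz (PySem.Str.replace (d.getD klucz "") "," "°")
        (d, some (match st.2 with
                  | none => [d.getD klucz ""]
                  | some ps => [d.getD klucz ""] ++ ps))
      else
        match st.2 with
        | none => (d, none)
        | some ps => (d.insert klucz "", some ([""] ++ ps)))
    (PySem.Dict.mk daneDoZapisu, none)
  match st.2 with
  | some ps => PySem.Str.join ";" ps
  | none => ""

-- ===== PRECONDITION & SPEC =====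
def Spec_stworz_ulice_nr_tel_url (daneDoZapisu : List (String × String)) (out : String) : Prop := out = stworz_ulice_nr_tel_url_alt daneDoZapisu
instance (daneDoZapisu : List (String × String)) (out : String) : Decidable (Spec_stworz_ulice_nr_tel_url daneDoZapisu out) := by unfold Spec_stworz_ulice_nr_tel_url; infer_instance

-- ===== CLAIM (what is proved, stated in full; the proofs are below) =====
def Claim_equal_stworz_ulice_nr_tel_url : Prop := ∀ (daneDoZapisu : List (String × String)), Dom_stworz_ulice_nr_tel_url daneDoZapisu → Spec_stworz_ulice_nr_tel_url daneDoZapisu (stworz_ulice_nr_tel_url daneDoZapisu)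

-- ===== LEMMAS AND PROOFS =====

theorem pv_main : ∀ (d0 : PySem.Dict String String),
    (let d := (["StreetDesc", "HouseNumber", "Phone", "MiscInfo"]).foldl
      (fun d klucz => if d.contains klucz then d.insert klucz (PySem.Str.replace (d.getD klucz "") "," "°") else d) d0
    if d.contains "MiscInfo" then
      let d := if !(d.contains "StreetDesc") then d.insert "StreetDesc" "" else d
      let d := if !(d.contains "HouseNumber") then d.insert "HouseNumber" "" else d
      let d := if !(d.contains "Phone") then d.insert "Phone" "" else d
      d.getD "StreetDesc" "" ++ ";" ++ d.getD "HouseNumber" "" ++ ";" ++ d.getD "Phone" "" ++ ";" ++ d.getD "MiscInfo" ""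
    else if d.contains "Phone" then
      let d := if !(d.contains "StreetDesc") then d.insert "StreetDesc" "" else d
      let d := if !(d.contains "HouseNumber") then d.insert "HouseNumber" "" else d
      d.getD "StreetDesc" "" ++ ";" ++ d.getD "HouseNumber" "" ++ ";" ++ d.getD "Phone" ""
    else if d.contains "HouseNumber" then
      let d := if !(d.contains "StreetDesc") then d.insert "StreetDesc" "" else d
      d.getD "StreetDesc" "" ++ ";" ++ d.getD "HouseNumber" ""
    else if d.contains "StreetDesc" then
      d.getD "StreetDesc" ""
    else
      "")
    =
    (let st := (["MiscInfo", "Phone", "HouseNumber", "StreetDesc"]).foldl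
      (fun (st : PySem.Dict String String × Option (List String)) klucz =>
        let d := st.1
        if d.contains klucz then
          let d := d.insert klucz (PySem.Str.replace (d.getD klucz "") "," "°")
          (d, some (match st.2 with
                    | none => [d.getD klucz ""]
                    | some ps => [d.getD klucz ""] ++ ps))
        else
          match st.2 with
          | none => (d, none)
          | some ps => (d.insert klucz "", some ([""] ++ ps)))
      (d0, none)
    match st.2 with
    | some ps => PySem.Str.join ";" ps
    | none => "") := by
  intro d0
  by_cases h3 : d0.contains "MiscInfo" <;> by_cases h2 : d0.contains "Phone" <;>
    by_cases h1 : d0.contains "HouseNumber" <;> by_cases h0 : d0.contains "StreetDesc" <;>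
    simp [h0, h1, h2, h3, PySem.Str.join,
      PySem.Dict.getD_insert, PySem.Dict.contains_insert] <;>
    (apply String.ext;
      simp [PySem.Chars.join_cons_cons, PySem.Chars.join_singleton])

-- ===== VERDICT (by name: the statement is the Claim_ definition above) =====
theorem stworz_ulice_nr_tel_url_spec : Claim_equal_stworz_ulice_nr_tel_url := by
  intro l _
  unfold Spec_stworz_ulice_nr_tel_url stworz_ulice_nr_tel_url stworz_ulice_nr_tel_url_alt
  exact pv_main (PySem.Dict.mk l)
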